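-- pv_equiv track=rewrite | github.com/daniel-reich/ubiquitous-fiesta | ASpHKyuSXZL3MjL92_17.py | amplify
-- ===== SOURCE A (Python) =====
-- def amplify(num):
--   lst = []
--   for value in range(1, num+1):
--     if value % 4 == 0:
--       lst.append(value*10)
--     else:
--       lst.append(value)
--   return lst
-- ===== SOURCE B (Python) =====
-- def amplify(num):
--     out = []
--     v = 1
--     while v + 3 <= num:
--         out += [v, v + 1, v + 2, (v + 3) * 10]
--         v += 4
--     out += list(range(v, num + 1))
--     return out
-- ===== Notes on version B (the rewrite author's own statement) =====
-- stated objective: alternative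
-- what changed: Replaces the per-element divisibility branch with a block loop that emits whole aligned chunks of four values with the fourth one amplified in closed form, then appends the short unamplified remainder as a plain range.
import Mathlib
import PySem

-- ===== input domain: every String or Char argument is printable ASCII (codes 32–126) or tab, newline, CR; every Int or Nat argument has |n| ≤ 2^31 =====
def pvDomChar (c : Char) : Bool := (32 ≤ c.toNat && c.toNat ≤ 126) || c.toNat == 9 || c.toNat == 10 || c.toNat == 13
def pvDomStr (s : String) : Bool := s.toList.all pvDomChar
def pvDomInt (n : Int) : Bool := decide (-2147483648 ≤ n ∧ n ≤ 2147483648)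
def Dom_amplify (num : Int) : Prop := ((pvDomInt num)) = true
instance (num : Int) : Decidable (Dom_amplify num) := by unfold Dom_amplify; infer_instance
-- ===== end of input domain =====

-- B builds the list in aligned chunks of four with the fourth entry amplified in closed form,
-- plus a plain-range remainder, instead of A's per-element divisibility branch (alternative decomposition).

-- ===== PORT A =====
def amplify (num : Int) : List Int :=
  (PySem.List.pyRange 1 (num + 1) 1).foldl
    (fun lst value =>
      if PySem.Int.mod value 4 == 0 then lst ++ [value * 10] else lst ++ [value])
    []

-- ===== PORT B =====
-- literal transcription of Source B's while loop: termination by the distance from v to num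
def amplifyChunks (num : Int) (out : List Int) (v : Int) : List Int :=
  if v + 3 ≤ num then
    amplifyChunks num (out ++ [v, v + 1, v + 2, (v + 3) * 10]) (v + 4)
  else
    out ++ PySem.List.pyRange v (num + 1) 1
termination_by (num + 1 - v).toNat
decreasing_by omega

def amplify_alt (num : Int) : List Int := amplifyChunks num [] 1

-- ===== PRECONDITION & SPEC =====
def Spec_amplify (num : Int) (out : List Int) : Prop := out = amplify_alt num
instance (num : Int) (out : List Int) : Decidable (Spec_amplify num out) := by unfold Spec_amplify; infer_instance

-- ===== CLAIM (what is proved, stated in full; the proofs are below) =====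
def Claim_equal_amplify : Prop := ∀ (num : Int), Dom_amplify num → Spec_amplify num (amplify num)

-- ===== LEMMAS AND PROOFS =====

-- the per-element transformation A applies
def pvF (v : Int) : Int := if PySem.Int.mod v 4 == 0 then v * 10 else v

theorem pvF_eq (v : Int) : pvF v = if v % 4 = 0 then v * 10 else v := by
  unfold pvF
  rw [PySem.Int.mod_eq_emod_of_pos (by norm_num : (0:Int) < 4)]
  simp only [beq_iff_eq]

theorem amplify_foldl (xs : List Int) (acc : List Int) :
    xs.foldl (fun lst value =>
      if PySem.Int.mod value 4 == 0 then lst ++ [value * 10] else lst ++ [value]) acc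
    = acc ++ xs.map pvF := by
  induction xs generalizing acc with
  | nil => simp
  | cons x xs ih =>
    simp only [List.foldl_cons, List.map_cons]
    have hx : (if PySem.Int.mod x 4 == 0 then acc ++ [x * 10] else acc ++ [x])
        = acc ++ [pvF x] := by
      unfold pvF; split_ifs <;> rfl
    rw [hx, ih]
    simp

theorem amplify_eq_map (num : Int) :
    amplify num = (PySem.List.pyRange 1 (num + 1) 1).map pvF := by
  unfold amplify
  simpa using amplify_foldl (PySem.List.pyRange 1 (num + 1) 1) []

theorem map_pvF_tail (num v : Int) (hv : v % 4 = 1) (hlt : num < v + 3) :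
    (PySem.List.pyRange v (num + 1) 1).map pvF = PySem.List.pyRange v (num + 1) 1 := by
  have h : ∀ x ∈ PySem.List.pyRange v (num + 1) 1, pvF x = x := by
    intro x hx
    rw [PySem.List.mem_pyRange_one] at hx
    rw [pvF_eq, if_neg (by omega)]
  rw [List.map_congr_left h]
  simp

theorem pyRange_four (v : Int) :
    PySem.List.pyRange v (v + 4) 1 = [v, v + 1, v + 2, v + 3] := by
  rw [PySem.List.pyRange_one_cons (by omega), PySem.List.pyRange_one_cons (by omega),
    PySem.List.pyRange_one_cons (by omega), PySem.List.pyRange_one_cons (by omega),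
    PySem.List.pyRange_one_eq_nil (by omega)]
  norm_num
  omega

theorem amplifyChunks_eq (num : Int) : ∀ k v out, (num + 1 - v).toNat = k → v % 4 = 1 →
    amplifyChunks num out v = out ++ (PySem.List.pyRange v (num + 1) 1).map pvF := by
  intro k
  induction k using Nat.strong_induction_on with
  | _ k ih =>
    intro v out hk hv
    unfold amplifyChunks
    by_cases h : v + 3 ≤ num
    · simp only [if_pos h]
      rw [ih ((num + 1 - (v + 4)).toNat) (by omega) (v + 4) _ rfl (by omega)]
      rw [PySem.List.pyRange_one_append v (v + 4) (num + 1) (by omega) (by omega),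
        pyRange_four]
      simp only [List.map_append, List.map_cons, List.map_nil, pvF_eq]
      rw [if_neg (by omega), if_neg (by omega), if_neg (by omega), if_pos (by omega)]
      simp
    · simp only [if_neg h]
      rw [map_pvF_tail num v hv (by omega)]

-- ===== VERDICT (by name: the statement is the Claim_ definition above) =====
theorem amplify_spec : Claim_equal_amplify := by
  intro num _
  unfold Spec_amplify amplify_alt
  rw [amplify_eq_map, amplifyChunks_eq num ((num + 1 - 1).toNat) 1 [] rfl (by norm_num)]
  simp
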